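-- pv_equiv track=rewrite | github.com/TimeNtWait/WhiteFang | Yandex_Algorithms_3_0/HomeWork_1/Task_3/Task_3_test_profiler.py | calc_stickers
-- ===== SOURCE A (Python) =====
-- def calc_stickers(n, diego_stickers, count_guests, limits_sticker_guests):
--     '''
--     входные данные
--     :n - кол-во наклеек у Диего
--     :diego_stickers - номера наклеек у Диего
--     :count_guests - кол-во гостей
--     :limits_sticker_guests - наименьшие номера наклеек, не интересующие гостей
--
--     выходные данные
--     :count_stickers_none_by_guest - кол-во различных чисел на наклейках, которые есть у Диего, но нет у гостя
--     '''
--     if count_guests == 0: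
--         return []
--     if n == 0:
--         return [0] * count_guests
--
--     # По условию макс кол-во гостей равно макс кол-ву наклеек:
--     # - Наивный вариант просто сделать перебор всех наклеек и всех гостей что будет N**2
--     # - Варинат получше, делать сортировку O(N*logN) и делать бинарный поиск для всех гостей O(N*logN) итого O(2*N*logN)
--
--     # Сортировка всех наклеек Диего для использования бинарного поиска
--     # интересует кол-во !различных! чисел на наклейках
--     diego_stickers = sorted(set(diego_stickers))
--     stickers_for_guest = []
--     for limit_by_guest in limits_sticker_guests:
--         # Поиск кол-ва подходящих наклеек через бинарный поиск.
--         l = 0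
--         r = len(diego_stickers) - 1
--         while l != r:
--             mid = (l + r + 1) // 2
--             if diego_stickers[mid] < limit_by_guest:
--                 l = mid
--             else:
--                 r = mid - 1
--         # Если левая граница равна 0 и при этом значение не подходит, значит подходящих марок нет
--         if l == 0 and diego_stickers[l] >= limit_by_guest:
--             stickers_for_guest.append(0)
--         else:
--             stickers_for_guest.append(l + 1)
--     return stickers_for_guest
-- ===== SOURCE B (Python) =====
-- def calc_stickers(n, diego_stickers, count_guests, limits_sticker_guests):
--     if count_guests == 0:
--         return []
--     if n == 0:
--         return [0] * count_guests
--     stickers = sorted(set(diego_stickers))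
--     res = [0] * len(limits_sticker_guests)
--     ptr = 0
--     for limit, idx in sorted((limit, i) for i, limit in enumerate(limits_sticker_guests)):
--         while ptr < len(stickers) and stickers[ptr] < limit:
--             ptr += 1
--         res[idx] = ptr
--     return res
-- ===== Notes on version B (the rewrite author's own statement) =====
-- stated objective: alternative
-- what changed: Replaces the per-guest hand-written binary search over the sorted distinct stickers with a single merge-style sweep (guest limits sorted with their original indices, one monotone pointer into the sorted distinct stickers, results reassembled in original order); it trades a binary search per guest for one extra sort plus a linear pass. Pre_ excludes only the inputs on which A raises IndexError (count_guests != 0, n != 0, diego_stickers empty, limits non-empty), where B would return a list of zeros.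
import Mathlib
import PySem

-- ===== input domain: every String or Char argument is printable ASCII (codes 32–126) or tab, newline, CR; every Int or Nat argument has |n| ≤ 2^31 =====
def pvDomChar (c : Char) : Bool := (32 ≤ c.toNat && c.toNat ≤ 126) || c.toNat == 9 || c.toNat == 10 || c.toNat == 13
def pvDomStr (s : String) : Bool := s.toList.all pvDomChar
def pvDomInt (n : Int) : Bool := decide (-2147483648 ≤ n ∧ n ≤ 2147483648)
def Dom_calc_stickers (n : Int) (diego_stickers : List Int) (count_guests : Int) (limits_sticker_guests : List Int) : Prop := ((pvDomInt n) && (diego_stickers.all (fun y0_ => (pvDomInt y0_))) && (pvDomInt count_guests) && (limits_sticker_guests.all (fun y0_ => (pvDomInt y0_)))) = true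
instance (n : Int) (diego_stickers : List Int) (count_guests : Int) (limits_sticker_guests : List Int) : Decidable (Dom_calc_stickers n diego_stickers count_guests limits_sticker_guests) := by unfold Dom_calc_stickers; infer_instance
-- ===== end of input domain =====

-- B replaces A's per-guest hand-written binary search by a single sorted-merge sweep over the
-- deduplicated sorted stickers (one monotone pointer, guests processed in sorted-limit order,
-- results reassembled at their original indices); equal on Pre_ (A raises IndexError outside it).


-- ===== PORT A =====
-- A's inner 'while l != r' binary search; fuel only makes the recursion total (Pre_ guarantees
-- the loop state keeps l ≤ r, so fuel = len(stickers) never runs out on admitted inputs).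
def pvBsearchA (st : List Int) (lim : Int) : Nat → Int → Int → Int
  | 0, l, _ => l
  | fuel + 1, l, r =>
    if l = r then l
    else
      let mid := PySem.Int.floordiv (l + r + 1) 2
      if PySem.List.pyGetD st mid 0 < lim then pvBsearchA st lim fuel mid r
      else pvBsearchA st lim fuel l (mid - 1)

def calc_stickers (n : Int) (diego_stickers : List Int) (count_guests : Int) (limits_sticker_guests : List Int) : List Int :=
  if count_guests = 0 then []
  else if n = 0 then PySem.List.pyRepeat [0] count_guests
  else
    let st := PySem.List.sorted (PySem.Set.ofList diego_stickers) (fun x => x) false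
    limits_sticker_guests.foldl (fun acc lim =>
      let l := pvBsearchA st lim st.length 0 ((st.length : Int) - 1)
      if l = 0 ∧ lim ≤ PySem.List.pyGetD st l 0 then acc ++ [0] else acc ++ [l + 1]) []

-- ===== PORT B =====
-- B's inner 'while ptr < len(stickers) and stickers[ptr] < limit: ptr += 1' — the un-consumed
-- suffix of the sorted sticker list stands for the pointer position, ptr is the same integer.
def pvAdvanceB (lim : Int) : List Int → Int → Int × List Int
  | [], ptr => (ptr, [])
  | x :: xs, ptr => if x < lim then pvAdvanceB lim xs (ptr + 1) else (ptr, x :: xs)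

def calc_stickers_alt (n : Int) (diego_stickers : List Int) (count_guests : Int) (limits_sticker_guests : List Int) : List Int :=
  if count_guests = 0 then []
  else if n = 0 then PySem.List.pyRepeat [0] count_guests
  else
    let st := PySem.List.sorted (PySem.Set.ofList diego_stickers) (fun x => x) false
    -- sorted((limit, i) for i, limit in enumerate(...)): the enumerated indices strictly increase,
    -- so Python's lexicographic tuple sort IS the stable sort by the limit component — exact here.
    let pairs := PySem.List.sorted ((PySem.List.enumerate limits_sticker_guests).map (fun p => (p.2, p.1))) (fun p => p.1) false
    let res0 : List Int := PySem.List.pyRepeat [0] (PySem.List.len limits_sticker_guests)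
    (pairs.foldl (fun (s : List Int × Int × List Int) p =>
        let a := pvAdvanceB p.1 s.2.2 s.2.1
        (PySem.List.pySetD s.1 p.2 a.1, a.1, a.2))
      (res0, 0, st)).1

-- ===== PRECONDITION & SPEC =====
-- Pre_ excludes exactly the inputs on which A raises IndexError: both degenerate-input guards
-- passed (count_guests ≠ 0, n ≠ 0) yet Diego has no stickers while some guest limit exists, so
-- the binary search indexes into an empty list.
def Pre_calc_stickers (n : Int) (diego_stickers : List Int) (count_guests : Int) (limits_sticker_guests : List Int) : Prop :=
  count_guests = 0 ∨ n = 0 ∨ diego_stickers ≠ [] ∨ limits_sticker_guests = []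
instance (n : Int) (diego_stickers : List Int) (count_guests : Int) (limits_sticker_guests : List Int) : Decidable (Pre_calc_stickers n diego_stickers count_guests limits_sticker_guests) := by unfold Pre_calc_stickers; infer_instance

def pvWitness_calc_stickers : Int × List Int × Int × List Int := (4, [5, 1, 5, 3], 2, [2, 6])

def Spec_calc_stickers (n : Int) (diego_stickers : List Int) (count_guests : Int) (limits_sticker_guests : List Int) (out : List Int) : Prop := out = calc_stickers_alt n diego_stickers count_guests limits_sticker_guests
instance (n : Int) (diego_stickers : List Int) (count_guests : Int) (limits_sticker_guests : List Int) (out : List Int) : Decidable (Spec_calc_stickers n diego_stickers count_guests limits_sticker_guests out) := by unfold Spec_calc_stickers; infer_instance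

-- ===== CLAIM (what is proved, stated in full; the proofs are below) =====
def Claim_equal_calc_stickers : Prop := ∀ (n : Int) (diego_stickers : List Int) (count_guests : Int) (limits_sticker_guests : List Int), Dom_calc_stickers n diego_stickers count_guests limits_sticker_guests → Pre_calc_stickers n diego_stickers count_guests limits_sticker_guests → Spec_calc_stickers n diego_stickers count_guests limits_sticker_guests (calc_stickers n diego_stickers count_guests limits_sticker_guests)


-- ===== LEMMAS AND PROOFS =====

-- the common value both programs compute per guest: number of distinct stickers strictly below the limit
def pvCnt (st : List Int) (lim : Int) : Nat := st.countP (fun x => decide (x < lim))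

lemma pvCnt_le_length (st : List Int) (lim : Int) : pvCnt st lim ≤ st.length :=
  List.countP_le_length

lemma pvCnt_mono (st : List Int) {a b : Int} (h : a ≤ b) : pvCnt st a ≤ pvCnt st b := by
  apply List.countP_mono_left
  intro x _ hx
  simp only [decide_eq_true_eq] at hx ⊢
  omega

-- characterisation on a strictly increasing list: st[i] < lim ↔ i < pvCnt st lim
lemma pvChar (st : List Int) (hst : st.Pairwise (· < ·)) (lim : Int) :
    ∀ i : Nat, ∀ hi : i < st.length, (st[i] < lim ↔ i < pvCnt st lim) := by
  induction st with
  | nil => intro i hi; simp at hi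
  | cons x xs ih =>
    intro i hi
    rcases List.pairwise_cons.mp hst with ⟨hx, hxs⟩
    cases i with
    | zero =>
      simp only [List.getElem_cons_zero]
      constructor
      · intro h; simp [pvCnt, h]
      · intro h
        by_contra hxl
        have h0 : xs.countP (fun y => decide (y < lim)) = 0 := by
          apply List.countP_eq_zero.mpr
          intro y hy
          have := hx y hy
          simp only [decide_eq_true_eq]
          omega
        simp [pvCnt, h0, hxl] at h
    | succ j =>
      simp only [List.getElem_cons_succ]
      have hj : j < xs.length := by simpa using hi
      have hiff := ih hxs j hj
      by_cases hxl : x < lim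
      · simp [pvCnt, hxl] at hiff ⊢
        omega
      · have h0 : xs.countP (fun y => decide (y < lim)) = 0 := by
          apply List.countP_eq_zero.mpr
          intro y hy
          have := hx y hy
          simp only [decide_eq_true_eq]
          omega
        have hy : ¬ xs[j] < lim := by
          have := hiff
          unfold pvCnt at this
          omega
        simp [pvCnt, hxl, h0]
        omega

-- the binary search lands on max(pvCnt - 1, 0)
lemma pvBsearchA_eq (st : List Int) (hst : st.Pairwise (· < ·)) (lim : Int) :
    ∀ fuel : Nat, ∀ l r t : Int, 0 ≤ l → l ≤ t → t ≤ r → r < st.length →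
      t = max ((pvCnt st lim : Int) - 1) 0 → (r - l).toNat ≤ fuel →
      pvBsearchA st lim fuel l r = t := by
  intro fuel
  induction fuel with
  | zero =>
    intro l r t h0 hlt htr hr ht hfuel
    simp only [pvBsearchA]
    omega
  | succ fuel ih =>
    intro l r t h0 hlt htr hr ht hfuel
    simp only [pvBsearchA]
    by_cases hlr : l = r
    · simp [hlr]; omega
    · simp only [hlr, if_false]
      have hlr' : l < r := by omega
      have hmid : l + 1 ≤ PySem.Int.floordiv (l + r + 1) 2 ∧ PySem.Int.floordiv (l + r + 1) 2 ≤ r := by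
        rw [PySem.Int.floordiv_eq_ediv_of_pos (by omega)]
        omega
      set mid := PySem.Int.floordiv (l + r + 1) 2 with hmiddef
      have hmid0 : 0 ≤ mid := by omega
      have hmidlen : mid < st.length := by omega
      have hget : PySem.List.pyGetD st mid 0 = st[mid.toNat]'(by omega) :=
        PySem.List.pyGetD_eq_getElem st 0 hmid0 (by exact_mod_cast hmidlen)
      have hchar := pvChar st hst lim mid.toNat (by omega)
      by_cases hc : st[mid.toNat]'(by omega) < lim
      · have hmc : mid.toNat < pvCnt st lim := hchar.mp hc
        rw [hget, if_pos hc]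
        exact ih mid r t hmid0 (by omega) htr hr ht (by omega)
      · have hmc : ¬ mid.toNat < pvCnt st lim := fun h => hc (hchar.mpr h)
        rw [hget, if_neg hc]
        exact ih l (mid - 1) t h0 hlt (by omega) (by omega) ht (by omega)

-- A's per-guest appended value is pvCnt
lemma pvA_step (st : List Int) (hst : st.Pairwise (· < ·)) (hne : st ≠ []) (lim : Int) :
    (if pvBsearchA st lim st.length 0 ((st.length : Int) - 1) = 0 ∧
        lim ≤ PySem.List.pyGetD st (pvBsearchA st lim st.length 0 ((st.length : Int) - 1)) 0
     then (0 : Int) else pvBsearchA st lim st.length 0 ((st.length : Int) - 1) + 1)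
    = (pvCnt st lim : Int) := by
  have hlen : 0 < st.length := List.length_pos_iff.mpr hne
  have hc_le := pvCnt_le_length st lim
  set t : Int := max ((pvCnt st lim : Int) - 1) 0 with htdef
  have hL : pvBsearchA st lim st.length 0 ((st.length : Int) - 1) = t := by
    apply pvBsearchA_eq st hst lim st.length 0 ((st.length : Int) - 1) t (by omega)
      (by omega) (by omega) (by omega) rfl (by omega)
  rw [hL]
  by_cases hc0 : pvCnt st lim = 0
  · have ht0 : t = 0 := by omega
    have hchar := pvChar st hst lim 0 hlen
    have hget : PySem.List.pyGetD st t 0 = st[(0:Nat)]'hlen := by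
      rw [ht0]; exact PySem.List.pyGetD_eq_getElem st 0 (by omega) (by exact_mod_cast hlen)
    have hnlt : ¬ st[(0:Nat)]'hlen < lim := fun h => by have := hchar.mp h; omega
    rw [if_pos ⟨ht0, by rw [hget]; omega⟩]
    omega
  · have htc : t = (pvCnt st lim : Int) - 1 := by omega
    by_cases ht0 : t = 0
    · have hchar := pvChar st hst lim 0 hlen
      have h1 : st[(0:Nat)]'hlen < lim := hchar.mpr (by omega)
      have hget : PySem.List.pyGetD st t 0 = st[(0:Nat)]'hlen := by
        rw [ht0]; exact PySem.List.pyGetD_eq_getElem st 0 (by omega) (by exact_mod_cast hlen)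
      rw [if_neg (by rw [hget]; intro ⟨_, h⟩; omega)]
      omega
    · rw [if_neg (by intro ⟨h, _⟩; exact ht0 h)]
      omega

-- A's whole loop is the map of pvCnt
lemma pvA_fold (st : List Int) (hst : st.Pairwise (· < ·)) (hne : st ≠ []) (limits : List Int) :
    (limits.foldl (fun acc lim =>
      let l := pvBsearchA st lim st.length 0 ((st.length : Int) - 1)
      if l = 0 ∧ lim ≤ PySem.List.pyGetD st l 0 then acc ++ [0] else acc ++ [l + 1]) [])
    = limits.map (fun lim => (pvCnt st lim : Int)) := by
  have hcongr := PySem.List.foldl_congr_mem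
    (l := limits) (init := ([] : List Int))
    (f := fun acc lim =>
      let l := pvBsearchA st lim st.length 0 ((st.length : Int) - 1)
      if l = 0 ∧ lim ≤ PySem.List.pyGetD st l 0 then acc ++ [0] else acc ++ [l + 1])
    (g := fun acc lim => acc ++ [(pvCnt st lim : Int)])
    (by
      intro acc lim _
      simp only
      have := pvA_step st hst hne lim
      split_ifs at this ⊢ <;> simp_all)
  rw [hcongr, PySem.List.foldl_append_singleton_eq_map]
  simp

-- B's pointer advance from position k lands on pvCnt
lemma pvAdvanceB_eq (st : List Int) (hst : st.Pairwise (· < ·)) (lim : Int) :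
    ∀ d k : Nat, st.length - k = d → k ≤ st.length → k ≤ pvCnt st lim →
      pvAdvanceB lim (st.drop k) (k : Int) = ((pvCnt st lim : Int), st.drop (pvCnt st lim)) := by
  intro d
  induction d with
  | zero =>
    intro k hd hk hkc
    have hkl : k = st.length := by omega
    have hc : pvCnt st lim = k := by have := pvCnt_le_length st lim; omega
    rw [hkl, List.drop_length]
    simp [pvAdvanceB, hc, hkl]
  | succ d ih =>
    intro k hd hk hkc
    have hklt : k < st.length := by omega
    rw [List.drop_eq_getElem_cons hklt]
    have hchar := pvChar st hst lim k hklt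
    by_cases hx : st[k] < lim
    · have hkc' : k + 1 ≤ pvCnt st lim := by have := hchar.mp hx; omega
      simp only [pvAdvanceB, if_pos hx]
      have := ih (k + 1) (by omega) (by omega) hkc'
      push_cast at this ⊢
      exact this
    · have hck : pvCnt st lim = k := by
        have : ¬ k < pvCnt st lim := fun h => hx (hchar.mpr h); omega
      simp only [pvAdvanceB, if_neg hx, hck]
      rw [← List.drop_eq_getElem_cons hklt]
  
-- the sweep fold with the pointer equals the plain "set each index to pvCnt" fold
lemma pvSweep_eq (st : List Int) (hst : st.Pairwise (· < ·)) :
    ∀ (pairs : List (Int × Int)) (res : List Int) (k : Nat),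
      k ≤ st.length → (∀ p ∈ pairs, (k : Int) ≤ (pvCnt st p.1 : Int)) →
      pairs.Pairwise (fun a b => a.1 ≤ b.1) →
      (pairs.foldl (fun (s : List Int × Int × List Int) p =>
          let a := pvAdvanceB p.1 s.2.2 s.2.1
          (PySem.List.pySetD s.1 p.2 a.1, a.1, a.2)) (res, (k : Int), st.drop k)).1
      = pairs.foldl (fun r p => PySem.List.pySetD r p.2 ((pvCnt st p.1 : Int))) res := by
  intro pairs
  induction pairs with
  | nil => intro res k _ _ _; simp
  | cons p ps ih =>
    intro res k hk hkc hpw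
    rcases List.pairwise_cons.mp hpw with ⟨hp, hps⟩
    have hkp : k ≤ pvCnt st p.1 := by exact_mod_cast hkc p (by simp)
    have hadv := pvAdvanceB_eq st hst p.1 (st.length - k) k rfl hk hkp
    simp only [List.foldl_cons, hadv]
    exact ih (PySem.List.pySetD res p.2 (pvCnt st p.1 : Int)) (pvCnt st p.1)
      (pvCnt_le_length st p.1)
      (by intro q hq; exact_mod_cast pvCnt_mono st (hp q hq))
      hps

-- the set-fold evaluated at an index
lemma pvSetFold (limits : List Int) (g : Int → Int) :
    ∀ (pairs : List (Int × Int)) (res : List Int),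
      res.length = limits.length →
      (∀ p ∈ pairs, 0 ≤ p.2 ∧ p.2.toNat < limits.length ∧ p.1 = limits[p.2.toNat]!) →
      (pairs.foldl (fun r p => PySem.List.pySetD r p.2 (g p.1)) res).length = limits.length ∧
      ∀ j : Nat, j < limits.length →
        (pairs.foldl (fun r p => PySem.List.pySetD r p.2 (g p.1)) res)[j]?
        = if ∃ p ∈ pairs, p.2 = (j : Int) then some (g limits[j]!) else res[j]? := by
  intro pairs
  induction pairs with
  | nil =>
    intro res hlen _
    refine ⟨by simpa using hlen, ?_⟩
    intro j hj
    simp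
  | cons p ps ih =>
    intro res hlen hcons
    have hp := hcons p (by simp)
    have hset : PySem.List.pySetD res p.2 (g p.1) = res.set p.2.toNat (g p.1) :=
      PySem.List.pySetD_of_nonneg res (g p.1) hp.1
    have hlen' : (PySem.List.pySetD res p.2 (g p.1)).length = limits.length := by
      rw [hset]; simpa using hlen
    have hih := ih (PySem.List.pySetD res p.2 (g p.1)) hlen'
      (fun q hq => hcons q (by simp [hq]))
    refine ⟨by simpa using hih.1, ?_⟩
    intro j hj
    rw [List.foldl_cons, hih.2 j hj]
    by_cases hex : ∃ q ∈ ps, q.2 = (j : Int)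
    · rw [if_pos hex]
      rcases hex with ⟨q, hq, hqj⟩
      rw [if_pos ⟨q, List.mem_cons_of_mem _ hq, hqj⟩]
    · rw [if_neg hex]
      by_cases hpj : p.2 = (j : Int)
      · have hjt : p.2.toNat = j := by omega
        rw [if_pos ⟨p, by simp, hpj⟩, hset, hjt]
        rw [List.getElem?_set_self (by omega)]
        rw [hp.2.2, hjt]
      · rw [if_neg (by rintro ⟨q, hq, hqj⟩; rcases (List.mem_cons.mp hq) with h | h
                       · exact hpj (h ▸ hqj)
                       · exact hex ⟨q, h, hqj⟩)]
        rw [hset, List.getElem?_set_ne (by omega)]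

-- ===== VERDICT (by name: the statement is the Claim_ definition above) =====
-- coverage/consistency of the enumerated-and-sorted pairs
lemma pvPairs_facts (lims : List Int) :
    (∀ p ∈ PySem.List.sorted ((PySem.List.enumerate lims).map (fun p => (p.2, p.1))) (fun p => p.1) false,
        0 ≤ p.2 ∧ p.2.toNat < lims.length ∧ p.1 = lims[p.2.toNat]!) ∧
    (∀ j : Nat, j < lims.length →
        ∃ p ∈ PySem.List.sorted ((PySem.List.enumerate lims).map (fun p => (p.2, p.1))) (fun p => p.1) false,
          p.2 = (j : Int)) := by
  have hperm := PySem.List.sorted_perm ((PySem.List.enumerate lims).map (fun p => (p.2, p.1))) (fun p => p.1) false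
  constructor
  · intro p hp
    have hp' := hperm.mem_iff.mp hp
    rcases List.mem_map.mp hp' with ⟨q, hq, hpq⟩
    rcases (PySem.List.mem_enumerate_iff lims 0 q).mp hq with ⟨k, hk, hqk⟩
    subst hpq hqk
    refine ⟨by simp, by simpa using hk, ?_⟩
    have hkt : ((0 : Int) + (k : Int)).toNat = k := by omega
    rw [hkt, List.getElem!_eq_getElem?_getD, List.getElem?_eq_getElem hk]
    rfl
  · intro j hj
    refine ⟨(lims[j], (j : Int)), hperm.mem_iff.mpr ?_, rfl⟩
    apply List.mem_map.mpr
    refine ⟨((j : Int), lims[j]), (PySem.List.mem_enumerate_iff lims 0 _).mpr ⟨j, hj, by simp⟩, rfl⟩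

theorem calc_stickers_spec : Claim_equal_calc_stickers := by
  intro n d cg lims _ hpre
  unfold Spec_calc_stickers calc_stickers calc_stickers_alt
  by_cases hcg : cg = 0
  · simp [hcg]
  · simp only [hcg, if_false]
    by_cases hn : n = 0
    · simp [hn]
    · simp only [hn, if_false]
      rcases hpre with h | h | hd | hl
      · exact absurd h hcg
      · exact absurd h hn
      · -- Diego has at least one sticker
        set st := PySem.List.sorted (PySem.Set.ofList d) (fun x => x) false with hstdef
        have hst : st.Pairwise (· < ·) := PySem.List.sorted_ofList_pairwise_lt d
        have hne : st ≠ [] := by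
          intro h
          have h2 : PySem.Set.ofList d = [] := (PySem.List.sorted_eq_nil_iff _ _ _).mp h
          cases d with
          | nil => exact hd rfl
          | cons x xs => rw [PySem.Set.ofList_cons] at h2; simp at h2
        rw [pvA_fold st hst hne lims]
        set g : Int → Int := fun lim => (pvCnt st lim : Int) with hgdef
        set pairs := PySem.List.sorted ((PySem.List.enumerate lims).map (fun p => (p.2, p.1))) (fun p => p.1) false with hpairsdef
        have hpw : pairs.Pairwise (fun a b => a.1 ≤ b.1) :=
          PySem.List.sorted_pairwise _ _
        have hfacts := pvPairs_facts lims
        set res0 : List Int := PySem.List.pyRepeat [0] (PySem.List.len lims) with hres0def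
        have hlen0 : res0.length = lims.length := by
          rw [hres0def, PySem.List.pyRepeat_singleton]
          simp [PySem.List.len]
        have hsweep := pvSweep_eq st hst pairs res0 0 (by omega)
          (by intro p _; exact_mod_cast Nat.zero_le _) hpw
        simp only [Nat.cast_zero, List.drop_zero] at hsweep
        rw [hsweep]
        have hF := pvSetFold lims g pairs res0 hlen0 hfacts.1
        apply List.ext_getElem?
        intro j
        by_cases hj : j < lims.length
        · rw [hF.2 j hj, if_pos (hfacts.2 j hj)]
          rw [List.getElem?_map, List.getElem?_eq_getElem hj]
          simp [List.getElem!_eq_getElem?_getD, List.getElem?_eq_getElem hj]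
        · rw [List.getElem?_eq_none (by simp; omega),
              List.getElem?_eq_none (by rw [hF.1]; omega)]
      · -- no guests in the list: both sides are []
        subst hl
        have hnil : PySem.List.sorted ([] : List (Int × Int)) (fun p : Int × Int => p.1) false = [] :=
          (PySem.List.sorted_eq_nil_iff _ _ _).mpr rfl
        simp [hnil]
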